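-- pv_equiv track=rewrite | github.com/camadkins/rummy_tracker | utils.py | is_valid_meld
-- ===== SOURCE A (Python) =====
-- def is_valid_meld(meld_cards):
--     ranks_order = "A23456789TJQK"
--     suits = [c[-1] for c in meld_cards]
--     ranks = [c[:-1] for c in meld_cards]
--
--     if len(meld_cards) < 3:
--         return False
--
--     # Check set
--     if len(set(ranks)) == 1:
--         return True
--
--     # Check run
--     if len(set(suits)) == 1:
--         indices = [ranks_order.index(r) for r in ranks]
--         indices.sort()
--         for i in range(len(indices)-1):
--             if indices[i+1] - indices[i] != 1:
--                 return False
--         return True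
--
--     return False
-- ===== SOURCE B (Python) =====
-- def is_valid_meld(meld_cards):
--     ranks_order = "A23456789TJQK"
--     if len(meld_cards) < 3:
--         return False
--     ranks = [c[:-1] for c in meld_cards]
--     # set meld: every rank equals the first
--     if all(r == ranks[0] for r in ranks):
--         return True
--     # a run needs a single suit: every last char equals the first card's
--     if any(c[-1] != meld_cards[0][-1] for c in meld_cards):
--         return False
--     indices = [ranks_order.index(r) for r in ranks]
--     # consecutive iff pairwise distinct with span n-1 (no sort needed)
--     return len(set(indices)) == len(indices) and max(indices) - min(indices) == len(indices) - 1
-- ===== Notes on version B (the rewrite author's own statement) =====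
-- stated objective: simpler
-- what changed: B drops the suits/ranks staging through sets: it guards on length first, tests the set meld by comparing every rank to the first, tests single-suitedness with an any() over last characters, and replaces A's sort + adjacent-difference scan by a sort-free distinctness-and-span test on the rank indices.
import Mathlib
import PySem

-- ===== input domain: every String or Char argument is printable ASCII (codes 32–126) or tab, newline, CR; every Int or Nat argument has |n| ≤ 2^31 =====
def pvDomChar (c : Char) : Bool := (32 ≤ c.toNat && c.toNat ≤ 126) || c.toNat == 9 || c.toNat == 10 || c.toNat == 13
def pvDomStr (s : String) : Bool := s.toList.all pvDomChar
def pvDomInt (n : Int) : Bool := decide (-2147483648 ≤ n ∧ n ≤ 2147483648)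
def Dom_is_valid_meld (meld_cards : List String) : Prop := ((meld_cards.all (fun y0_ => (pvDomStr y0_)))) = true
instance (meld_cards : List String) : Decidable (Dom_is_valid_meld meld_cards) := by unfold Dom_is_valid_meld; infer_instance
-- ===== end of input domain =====

-- B restructures A: length guard first, set meld by comparing each rank to the first, single-suit
-- test via an any() over last characters, and a sort-free distinctness-and-span test replacing
-- A's sort + adjacent-difference scan (objective: simpler); same Bool proved on Pre_.


-- ===== PORT A =====
-- the loop `for i in range(len(indices)-1): if indices[i+1]-indices[i] != 1: return False` / `return True`
def pvChkAdj : List Int → Bool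
  | x :: y :: t => if y - x ≠ 1 then false else pvChkAdj (y :: t)
  | _ => true

def is_valid_meld (meld_cards : List String) : Bool :=
  let ranks_order := "A23456789TJQK"
  let suits := meld_cards.map (fun c => (PySem.Str.pyGet? c (-1)).getD ' ')   -- c[-1]; none (IndexError) excluded by Pre_
  let ranks := meld_cards.map (fun c => PySem.Str.slice c none (some (-1)))   -- c[:-1]
  if meld_cards.length < 3 then false
  else if PySem.Set.len (PySem.Set.ofList ranks) == 1 then true
  else if PySem.Set.len (PySem.Set.ofList suits) == 1 then
    -- ranks_order.index(r): -1 (ValueError) excluded by Pre_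
    let indices := ranks.map (fun r => PySem.Str.find ranks_order r)
    pvChkAdj (PySem.List.sorted indices (fun x => x) false)
  else false

-- ===== PORT B =====
def is_valid_meld_alt (meld_cards : List String) : Bool :=
  let ranks_order := "A23456789TJQK"
  if meld_cards.length < 3 then false
  else
    let ranks := meld_cards.map (fun c => PySem.Str.slice c none (some (-1)))   -- c[:-1]
    -- ranks[0] / meld_cards[0]: headD is exact here, the length guard gives a nonempty list
    if ranks.all (fun r => r == ranks.headD "") then true
    else if meld_cards.any (fun c =>
        (PySem.Str.pyGet? c (-1)).getD ' ' != (PySem.Str.pyGet? (meld_cards.headD "") (-1)).getD ' ')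
      then false
    else
      -- ranks_order.index(r): -1 (ValueError) excluded by Pre_
      let indices := ranks.map (fun r => PySem.Str.find ranks_order r)
      (PySem.Set.len (PySem.Set.ofList indices) == (indices.length : Int)) &&
        ((PySem.List.max? indices (fun x => x)).getD 0 - (PySem.List.min? indices (fun x => x)).getD 0
          == (indices.length : Int) - 1)

-- ===== PRECONDITION & SPEC =====
-- Pre_ excludes exactly the inputs where the Python raises: an empty-string card (IndexError on c[-1]),
-- and, when the run branch is reached, a rank that is not a substring of "A23456789TJQK" (ValueError on .index).
def Pre_is_valid_meld (meld_cards : List String) : Prop :=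
  (∀ c ∈ meld_cards, c ≠ "") ∧
  (3 ≤ meld_cards.length →
    PySem.Set.len (PySem.Set.ofList (meld_cards.map (fun c => PySem.Str.slice c none (some (-1))))) ≠ 1 →
    PySem.Set.len (PySem.Set.ofList (meld_cards.map (fun c => (PySem.Str.pyGet? c (-1)).getD ' '))) = 1 →
    ∀ c ∈ meld_cards, PySem.Str.find "A23456789TJQK" (PySem.Str.slice c none (some (-1))) ≠ -1)
instance (meld_cards : List String) : Decidable (Pre_is_valid_meld meld_cards) := by
  unfold Pre_is_valid_meld; infer_instance

def pvWitness_is_valid_meld : List String := ["2h", "3h", "4h"]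

def Spec_is_valid_meld (meld_cards : List String) (out : Bool) : Prop := out = is_valid_meld_alt meld_cards
instance (meld_cards : List String) (out : Bool) : Decidable (Spec_is_valid_meld meld_cards out) := by unfold Spec_is_valid_meld; infer_instance

-- ===== CLAIM (what is proved, stated in full; the proofs are below) =====
def Claim_equal_is_valid_meld : Prop := ∀ (meld_cards : List String), Dom_is_valid_meld meld_cards → Pre_is_valid_meld meld_cards → Spec_is_valid_meld meld_cards (is_valid_meld meld_cards)

-- ===== LEMMAS AND PROOFS =====

-- len(set(l)) == 1 iff every element equals the head (nonempty l)
theorem pvSetLenOne {α : Type} [DecidableEq α] (a : α) (t : List α) :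
    PySem.Set.len (PySem.Set.ofList (a :: t)) = 1 ↔ ∀ x ∈ a :: t, x = a := by
  constructor
  · intro h x hx
    obtain ⟨y, hy⟩ : ∃ y, PySem.Set.ofList (a :: t) = [y] := by
      cases hs : PySem.Set.ofList (a :: t) with
      | nil =>
        exfalso
        have : a ∈ PySem.Set.ofList (a :: t) := (PySem.Set.mem_ofList _ _).mpr (by simp)
        rw [hs] at this; simp at this
      | cons y s =>
        rw [hs] at h
        have hs0 : s.length = 0 := by
          have h2 : ((s.length + 1 : Nat) : Int) = 1 := by
            simpa [PySem.Set.len] using h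
          omega
        exact ⟨y, by rw [List.length_eq_zero_iff.mp hs0]⟩
    have hxa : x ∈ PySem.Set.ofList (a :: t) := (PySem.Set.mem_ofList _ _).mpr hx
    have haa : a ∈ PySem.Set.ofList (a :: t) := (PySem.Set.mem_ofList _ _).mpr (by simp)
    rw [hy] at hxa haa
    simp at hxa haa
    rw [hxa, haa]
  · intro h
    have : PySem.Set.ofList (a :: t) = [a] := by
      have hsub : ∀ x ∈ PySem.Set.ofList (a :: t), x = a := fun x hx =>
        h x ((PySem.Set.mem_ofList _ _).mp hx)
      have hmem : a ∈ PySem.Set.ofList (a :: t) := (PySem.Set.mem_ofList _ _).mpr (by simp)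
      have hnd := PySem.Set.nodup_ofList (a :: t)
      cases hs : PySem.Set.ofList (a :: t) with
      | nil => rw [hs] at hmem; simp at hmem
      | cons y s =>
        rw [hs] at hsub hnd
        have hy : y = a := hsub y (by simp)
        have : s = [] := by
          cases s with
          | nil => rfl
          | cons z s' =>
            have hz : z = a := hsub z (by simp)
            rw [hy, hz] at hnd
            simp at hnd
        rw [hy, this]
    simp [this, PySem.Set.len]
  -- the consecutive run a, a+1, ..., a+n-1 (proof-side helper only)

def pvArith (a : Int) (n : Nat) : List Int := (List.range n).map (fun i : Nat => a + (i : Int))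

theorem pvArith_succ (a : Int) (n : Nat) : pvArith a (n + 1) = a :: pvArith (a + 1) n := by
  unfold pvArith
  rw [List.range_succ_eq_map, List.map_cons, List.map_map]
  refine congrArg₂ _ (by simp) (List.map_congr_left ?_)
  intro i _
  simp only [Function.comp_apply]
  push_cast
  ring

theorem pvArith_length (a : Int) (n : Nat) : (pvArith a n).length = n := by
  simp [pvArith]

theorem pvArith_mem (a x : Int) (n : Nat) : x ∈ pvArith a n ↔ ∃ i : Nat, i < n ∧ x = a + i := by
  simp only [pvArith, List.mem_map, List.mem_range]
  constructor
  · rintro ⟨i, hi, rfl⟩; exact ⟨i, hi, rfl⟩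
  · rintro ⟨i, hi, rfl⟩; exact ⟨i, hi, rfl⟩

theorem pvArith_nodup (a : Int) (n : Nat) : (pvArith a n).Nodup :=
  List.Nodup.map (fun x y hxy => by omega) List.nodup_range

-- pvChkAdj accepts a list iff it is the consecutive sequence starting at its head
theorem pvChkAdj_iff (a : Int) (t : List Int) :
    pvChkAdj (a :: t) = true ↔ a :: t = pvArith a (t.length + 1) := by
  induction t generalizing a with
  | nil => simp [pvChkAdj, pvArith]
  | cons b t ih =>
    rw [show (b :: t).length + 1 = (t.length + 1) + 1 from rfl, pvArith_succ, pvArith_succ]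
    constructor
    · intro h
      have hb : b - a = 1 := by
        by_contra hne
        simp [pvChkAdj, hne] at h
      have hchk : pvChkAdj (b :: t) = true := by
        simpa [pvChkAdj, hb] using h
      have h2 := (ih b).mp hchk
      rw [pvArith_succ] at h2
      have hba : a + 1 = b := by omega
      rw [List.cons_eq_cons]
      exact ⟨rfl, by rw [hba]; exact h2⟩
    · intro h
      rw [List.cons_eq_cons, List.cons_eq_cons] at h
      obtain ⟨-, hb1, ht⟩ := h
      subst hb1
      have h2 : (a + 1) :: t = pvArith (a + 1) (t.length + 1) := by
        rw [pvArith_succ]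
        exact congrArg _ ht
      have hrec := (ih (a + 1)).mpr h2
      simp [pvChkAdj, hrec]

-- strictly increasing Int lists grow at least by one per step
theorem pvStrictGet (s : List Int) (hs : s.Pairwise (fun x y : Int => x < y)) (i j : Nat) (hij : i ≤ j)
    (hj : j < s.length) :
    s[i]'(lt_of_le_of_lt hij hj) + ((j : Int) - (i : Int)) ≤ s[j] := by
  induction j, hij using Nat.le_induction with
  | base => simp
  | succ j hij ih =>
    have h1 : s[j]'(by omega) < s[j + 1] :=
      List.pairwise_iff_getElem.mp hs j (j + 1) (by omega) hj (by omega)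
    have h2 := ih (by omega)
    push_cast
    push_cast at h2
    omega

-- len(set(l)) == len(l) iff l has no duplicates
theorem pvSetLen_iff (l : List Int) :
    PySem.Set.len (PySem.Set.ofList l) = (l.length : Int) ↔ l.Nodup := by
  constructor
  · intro h
    have hlen : (PySem.Set.ofList l).length = l.length := by
      simpa [PySem.Set.len] using h
    have hfin : (PySem.Set.ofList l).toFinset = l.toFinset := by
      ext x; simp [List.mem_toFinset, PySem.Set.mem_ofList]
    have hcard : l.toFinset.card = l.length := by
      rw [← hfin, List.toFinset_card_of_nodup (PySem.Set.nodup_ofList l), hlen]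
    rw [List.card_toFinset] at hcard
    exact List.dedup_eq_self.mp (l.dedup_sublist.eq_of_length hcard)
  · intro h
    simp [PySem.Set.ofList_eq_self_of_nodup l h, PySem.Set.len]

-- the run-branch equivalence: sort + adjacent-difference scan = distinctness + span test
theorem pvRunEquiv (l : List Int) (hne : l ≠ []) :
    pvChkAdj (PySem.List.sorted l (fun x => x) false) =
      ((PySem.Set.len (PySem.Set.ofList l) == (l.length : Int)) &&
       ((PySem.List.max? l (fun x => x)).getD 0 - (PySem.List.min? l (fun x => x)).getD 0
         == (l.length : Int) - 1)) := by
  obtain ⟨a, t, hs⟩ : ∃ a t, PySem.List.sorted l (fun x => x) false = a :: t := by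
    cases h : PySem.List.sorted l (fun x => x) false with
    | nil => exact absurd ((PySem.List.sorted_eq_nil_iff l (fun x => x) false).mp h) hne
    | cons a t => exact ⟨a, t, rfl⟩
  have hperm : (a :: t).Perm l := hs ▸ PySem.List.sorted_perm l (fun x => x) false
  have hlen : t.length + 1 = l.length := by simpa using hperm.length_eq
  have hpw : (a :: t).Pairwise (fun x y : Int => x ≤ y) := by
    have h := PySem.List.sorted_pairwise l (fun x : Int => x)
    rw [hs] at h; exact h
  obtain ⟨m, hm⟩ : ∃ m, PySem.List.min? l (fun x : Int => x) = some m := by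
    cases h : PySem.List.min? l (fun x : Int => x) with
    | none => exact absurd ((PySem.List.min?_eq_none_iff l _).mp h) hne
    | some m => exact ⟨m, rfl⟩
  obtain ⟨M, hM⟩ : ∃ M, PySem.List.max? l (fun x : Int => x) = some M := by
    cases h : PySem.List.max? l (fun x : Int => x) with
    | none => exact absurd ((PySem.List.max?_eq_none_iff l _).mp h) hne
    | some M => exact ⟨M, rfl⟩
  rw [hs, Bool.eq_iff_iff, pvChkAdj_iff, Bool.and_eq_true, beq_iff_eq, beq_iff_eq, hm, hM,
    Option.getD_some, Option.getD_some, pvSetLen_iff]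
  have hma_mem : a ∈ l := hperm.mem_iff.mp (by simp)
  constructor
  · -- consecutive sorted list ⇒ nodup ∧ span
    intro h
    have hnd : (a :: t).Nodup := by rw [h]; exact pvArith_nodup a (t.length + 1)
    have hmem : ∀ x ∈ l, ∃ i : Nat, i < t.length + 1 ∧ x = a + i := by
      intro x hx
      have hx2 : x ∈ a :: t := hperm.mem_iff.mpr hx
      rw [h, pvArith_mem] at hx2
      exact hx2
    have htop : a + (t.length : Int) ∈ l := by
      apply hperm.mem_iff.mp
      rw [h, pvArith_mem]
      exact ⟨t.length, by omega, rfl⟩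
    have hma : m = a := by
      have h1 := PySem.List.min?_isMin hm a hma_mem
      obtain ⟨i, hi, hxi⟩ := hmem m (PySem.List.min?_mem hm)
      simp only at h1
      omega
    have hMa : M = a + (t.length : Int) := by
      have h1 := PySem.List.max?_isMax hM _ htop
      obtain ⟨i, hi, hxi⟩ := hmem M (PySem.List.max?_mem hM)
      simp only at h1
      omega
    refine ⟨hperm.nodup hnd, ?_⟩
    rw [hma, hMa, ← hlen]
    push_cast
    ring
  · -- nodup ∧ span ⇒ the sorted list is consecutive
    rintro ⟨hnd, hspan⟩
    have hnds : (a :: t).Nodup := hperm.nodup_iff.mpr hnd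
    have hlt : (a :: t).Pairwise (fun x y : Int => x < y) := by
      have hand := List.Pairwise.and hpw hnds
      exact hand.imp (fun hxy => lt_of_le_of_ne hxy.1 hxy.2)
    have hma : m = a := by
      have h1 : m ≤ a := by
        have := PySem.List.min?_isMin hm a hma_mem
        simpa using this
      have h2 : a ≤ m := by
        have hmml : m ∈ a :: t := hperm.mem_iff.mpr (PySem.List.min?_mem hm)
        rcases List.mem_cons.mp hmml with h | h
        · omega
        · have := List.rel_of_pairwise_cons hpw h
          simpa using this
      omega
    have hub : ∀ y ∈ a :: t, y ≤ M := by
      intro y hy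
      have := PySem.List.max?_isMax hM y (hperm.mem_iff.mp hy)
      simpa using this
    have hMval : M = a + (t.length : Int) := by
      rw [hma] at hspan
      rw [← hlen] at hspan
      push_cast at hspan
      omega
    apply List.ext_getElem (by rw [pvArith_length]; simp)
    intro i hi hi'
    have hlow : a + (i : Int) ≤ (a :: t)[i] := by
      have := pvStrictGet (a :: t) hlt 0 i (by omega) hi
      simpa using this
    have hhigh : (a :: t)[i] ≤ a + (i : Int) := by
      have hi1 : i ≤ t.length := by simp at hi; omega
      have hlast := pvStrictGet (a :: t) hlt i t.length hi1 (by simp)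
      have hlastub : (a :: t)[t.length]'(by simp) ≤ M := hub _ (List.getElem_mem _)
      omega
    have hval : (a :: t)[i] = a + (i : Int) := le_antisymm hhigh hlow
    rw [hval]
    simp [pvArith]

-- an if on a negated Bool guard swaps the branches (proof-side helper only)
theorem pvIteNot {α : Type} (b : Bool) (x y : α) :
    (if (!b) = true then x else y) = if b = true then y else x := by
  cases b <;> simp

theorem pv_main (meld_cards : List String) :
    is_valid_meld meld_cards = is_valid_meld_alt meld_cards := by
  unfold is_valid_meld is_valid_meld_alt
  dsimp only
  by_cases hlen : meld_cards.length < 3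
  · simp [hlen]
  · simp only [hlen, if_false]
    obtain ⟨c0, cs, rfl⟩ : ∃ c0 cs, meld_cards = c0 :: cs := by
      cases meld_cards with
      | nil => simp at hlen
      | cons c0 cs => exact ⟨c0, cs, rfl⟩
    have hset : (PySem.Set.len (PySem.Set.ofList
          ((c0 :: cs).map (fun c => PySem.Str.slice c none (some (-1))))) == 1) =
        ((c0 :: cs).map (fun c => PySem.Str.slice c none (some (-1)))).all
          (fun r => r == ((c0 :: cs).map (fun c => PySem.Str.slice c none (some (-1)))).headD "") := by
      simp only [List.map_cons, List.headD_cons]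
      rw [Bool.eq_iff_iff, beq_iff_eq, pvSetLenOne, List.all_eq_true]
      constructor <;> intro h x hx <;> simpa using h x hx
    have hsuit : (PySem.Set.len (PySem.Set.ofList
          ((c0 :: cs).map (fun c => (PySem.Str.pyGet? c (-1)).getD ' '))) == 1) =
        !((c0 :: cs).any (fun c =>
          (PySem.Str.pyGet? c (-1)).getD ' ' != (PySem.Str.pyGet? ((c0 :: cs).headD "") (-1)).getD ' ')) := by
      simp only [List.map_cons, List.headD_cons]
      rw [Bool.eq_iff_iff, beq_iff_eq, Bool.not_eq_true', Bool.eq_false_iff, Ne, List.any_eq_true,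
        pvSetLenOne]
      constructor
      · rintro h ⟨c, hc, hne⟩
        refine (bne_iff_ne.mp hne) ?_
        exact h ((PySem.Str.pyGet? c (-1)).getD ' ')
          (show _ ∈ List.map (fun c => (PySem.Str.pyGet? c (-1)).getD ' ') (c0 :: cs) from
            List.mem_map_of_mem hc)
      · intro h x hx
        obtain ⟨c, hc, rfl⟩ := List.mem_map.mp
          (show x ∈ List.map (fun c => (PySem.Str.pyGet? c (-1)).getD ' ') (c0 :: cs) from hx)
        by_contra hne
        exact h ⟨c, hc, bne_iff_ne.mpr hne⟩
    rw [hset, hsuit, pvIteNot]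
    split_ifs with h1 h2
    · rfl
    · rfl
    · apply pvRunEquiv
      simp

-- ===== VERDICT (by name: the statement is the Claim_ definition above) =====
theorem is_valid_meld_spec : Claim_equal_is_valid_meld := by
  intro meld_cards _ _
  unfold Spec_is_valid_meld
  exact pv_main meld_cards
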